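-- pv_equiv track=rewrite | github.com/fabioc-aloha/Alex_Marketing | scripts/github_sync.py | get_latest_changes
-- ===== SOURCE A (Python) =====
-- def get_latest_changes(changelog: str) -> str:
--     """Extract the latest version's changes from changelog."""
--     if not changelog:
--         return ""
--
--     lines = changelog.split("\n")
--     in_latest = False
--     changes = []
--
--     for line in lines:
--         if line.startswith("## [") and not in_latest:
--             in_latest = True
--             continue
--         elif line.startswith("## [") and in_latest:
--             break
--         elif in_latest:
--             changes.append(line)
--
--     return "\n".join(changes).strip()
-- ===== SOURCE B (Python) =====
-- def get_latest_changes(changelog: str) -> str: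
--     """Extract the latest version's changes from changelog (index-then-slice)."""
--     lines = changelog.split("\n")
--     headers = [i for i, line in enumerate(lines) if line.startswith("## [")]
--     if not headers:
--         return ""
--     start = headers[0] + 1
--     end = headers[1] if len(headers) > 1 else len(lines)
--     return "\n".join(lines[start:end]).strip()
-- ===== Notes on version B (the rewrite author's own statement) =====
-- stated objective: simpler
-- what changed: Replaced the boolean-flag state machine with a two-phase build-index-then-slice structure: collect all header-line positions once, then slice between the first and second header.
import Mathlib
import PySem

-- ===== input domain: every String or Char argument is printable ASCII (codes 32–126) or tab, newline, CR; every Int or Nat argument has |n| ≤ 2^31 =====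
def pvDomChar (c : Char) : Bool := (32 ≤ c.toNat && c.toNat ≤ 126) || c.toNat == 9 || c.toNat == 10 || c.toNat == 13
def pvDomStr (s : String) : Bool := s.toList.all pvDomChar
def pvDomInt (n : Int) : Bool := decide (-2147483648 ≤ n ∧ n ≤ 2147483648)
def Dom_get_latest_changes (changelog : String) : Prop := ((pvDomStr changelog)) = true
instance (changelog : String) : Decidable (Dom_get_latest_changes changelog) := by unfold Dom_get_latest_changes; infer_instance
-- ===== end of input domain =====

-- B replaces A's boolean-flag single pass by a build-header-index-then-slice two-phase structure (objective: simpler).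

-- ===== PORT A =====
-- the for-loop with in_latest flag, changes accumulator and break
def pvLoopA : List String → Bool → List String → List String
  | [], _, changes => changes
  | line :: rest, inLatest, changes =>
    if PySem.Str.startswith line "## [" && !inLatest then
      pvLoopA rest true changes
    else if PySem.Str.startswith line "## [" && inLatest then
      changes
    else if inLatest then
      pvLoopA rest inLatest (changes ++ [line])
    else
      pvLoopA rest inLatest changes

def get_latest_changes (changelog : String) : String :=
  if changelog == "" then ""
  else
    let lines := (PySem.Str.split? changelog "\n").getD []
    PySem.Str.strip (PySem.Str.join "\n" (pvLoopA lines false []))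

-- ===== PORT B =====
def get_latest_changes_alt (changelog : String) : String :=
  let lines := (PySem.Str.split? changelog "\n").getD []
  let headers := ((PySem.List.enumerate lines 0).filter
      (fun p => PySem.Str.startswith p.2 "## [")).map (·.1)
  match headers with
  | [] => ""
  | h0 :: rest =>
    let start := h0 + 1
    let stop : Int := match rest with | h1 :: _ => h1 | [] => (lines.length : Int)
    PySem.Str.strip (PySem.Str.join "\n" (PySem.List.slice lines (some start) (some stop)))

-- ===== PRECONDITION & SPEC =====
def Spec_get_latest_changes (changelog : String) (out : String) : Prop := out = get_latest_changes_alt changelog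
instance (changelog : String) (out : String) : Decidable (Spec_get_latest_changes changelog out) := by unfold Spec_get_latest_changes; infer_instance

-- ===== CLAIM (what is proved, stated in full; the proofs are below) =====
def Claim_equal_get_latest_changes : Prop := ∀ (changelog : String), Dom_get_latest_changes changelog → Spec_get_latest_changes changelog (get_latest_changes changelog)

-- ===== LEMMAS AND PROOFS =====

-- Nat-index version of B's header-position list (proof helper)
def pvHdrIdx (ls : List String) (s : Nat) : List Nat :=
  match ls with
  | [] => []
  | l :: rest => (if PySem.Str.startswith l "## [" then [s] else []) ++ pvHdrIdx rest (s + 1)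

theorem pvHdrIdx_shift (ls : List String) (s : Nat) :
    pvHdrIdx ls s = (pvHdrIdx ls 0).map (· + s) := by
  induction ls generalizing s with
  | nil => simp [pvHdrIdx]
  | cons l rest ih =>
    simp only [pvHdrIdx]
    rw [ih (s + 1), ih 1]
    by_cases h : PySem.Chars.startswith l.toList ['#','#',' ','['] = true <;>
      simp [h, Function.comp_def, Nat.add_comm, Nat.add_left_comm]

theorem pvHdrIdx_nil_iff (ls : List String) (s : Nat) :
    pvHdrIdx ls s = [] ↔ ∀ x ∈ ls, PySem.Chars.startswith x.toList ['#','#',' ','['] = false := by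
  induction ls generalizing s with
  | nil => simp [pvHdrIdx]
  | cons l rest ih =>
    by_cases h : PySem.Chars.startswith l.toList ['#','#',' ','['] = true <;>
      simp [pvHdrIdx, h, ih]

theorem pvHeaders_eq (ls : List String) (s : Nat) :
    ((PySem.List.enumerate ls (s : Int)).filter
      (fun p => PySem.Str.startswith p.2 "## [")).map (·.1)
      = (pvHdrIdx ls s).map (Nat.cast) := by
  induction ls generalizing s with
  | nil => simp [PySem.List.enumerate_nil, pvHdrIdx]
  | cons l rest ih =>
    have ih' := ih (s + 1)
    by_cases h : PySem.Chars.startswith l.toList ['#','#',' ','['] = true <;>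
      simp [PySem.List.enumerate_cons, pvHdrIdx, h, ← ih']

-- the in-phase of A's loop collects until the next header
theorem pvLoopA_true (ls : List String) (acc : List String) :
    pvLoopA ls true acc = acc ++ ls.takeWhile (fun l => !PySem.Str.startswith l "## [") := by
  induction ls generalizing acc with
  | nil => simp [pvLoopA]
  | cons l rest ih =>
    by_cases h : PySem.Chars.startswith l.toList ['#','#',' ','['] = true <;>
      simp [pvLoopA, h, ih]

-- takeWhile in terms of the first header position
theorem pvTakeWhile_hdrIdx (ls : List String) :
    (pvHdrIdx ls 0 = [] → ls.takeWhile (fun l => !PySem.Str.startswith l "## [") = ls) ∧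
    (∀ k t, pvHdrIdx ls 0 = k :: t →
      ls.takeWhile (fun l => !PySem.Str.startswith l "## [") = ls.take k) := by
  induction ls with
  | nil => simp [pvHdrIdx]
  | cons l rest ih =>
    by_cases h : PySem.Chars.startswith l.toList ['#','#',' ','['] = true
    · refine ⟨by simp [pvHdrIdx, h], ?_⟩
      intro k t hk
      simp [pvHdrIdx, h] at hk
      simp [h, ← hk.1]
    · have h' : PySem.Chars.startswith l.toList ['#','#',' ','['] = false := by simpa using h
      constructor
      · intro hE
        simp [pvHdrIdx, h', pvHdrIdx_shift rest 1] at hE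
        simp [h']
        exact (pvHdrIdx_nil_iff rest 0).mp hE
      · intro k t hk
        simp [pvHdrIdx, h', pvHdrIdx_shift rest 1] at hk
        cases hr : pvHdrIdx rest 0 with
        | nil => rw [hr] at hk; simp at hk
        | cons k0 t0 =>
          rw [hr] at hk
          simp at hk
          simp [h', ← hk.1]
          simpa using ih.2 k0 t0 hr

-- core equivalence on the list of lines
theorem pvCore (ls : List String) :
    pvLoopA ls false [] =
      (match pvHdrIdx ls 0 with
       | [] => []
       | h0 :: rest =>
         (ls.drop (h0 + 1)).take
           ((match rest with | h1 :: _ => h1 | [] => ls.length) - (h0 + 1))) := by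
  induction ls with
  | nil => simp [pvLoopA, pvHdrIdx]
  | cons l rest ih =>
    by_cases h : PySem.Chars.startswith l.toList ['#','#',' ','['] = true
    · -- head is the first header: A's in-phase collects the takeWhile of the tail
      have hloop : pvLoopA (l :: rest) false [] = pvLoopA rest true [] := by
        simp [pvLoopA, h]
      rw [hloop, pvLoopA_true]
      simp only [pvHdrIdx, pvHdrIdx_shift rest 1]
      rw [if_pos (show PySem.Str.startswith l "## [" = true by simpa using h)]
      cases hr : pvHdrIdx rest 0 with
      | nil =>
        simp
        exact fun x hx => by
          have := (pvHdrIdx_nil_iff rest 0).mp hr x hx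
          simpa using this
      | cons k t =>
        simpa using (pvTakeWhile_hdrIdx rest).2 k t hr
    · have hloop : pvLoopA (l :: rest) false [] = pvLoopA rest false [] := by
        simp [pvLoopA, h]
      rw [hloop, ih]
      simp only [pvHdrIdx, pvHdrIdx_shift rest 1]
      rw [if_neg (show ¬ PySem.Str.startswith l "## [" = true by simpa using h)]
      cases hr : pvHdrIdx rest 0 with
      | nil => simp
      | cons k t =>
        simp only [List.nil_append, List.map_cons]
        cases t with
        | nil =>
          simp only [List.map_nil, List.drop_succ_cons, List.length_cons]
          congr 1
          omega
        | cons k1 t1 =>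
          simp only [List.map_cons, List.drop_succ_cons]
          congr 1
          omega

-- the two whole bodies agree for any list of lines
theorem pvMain (lines : List String) :
    PySem.Str.strip (PySem.Str.join "\n" (pvLoopA lines false [])) =
      (match ((PySem.List.enumerate lines 0).filter
          (fun p => PySem.Str.startswith p.2 "## [")).map (·.1) with
       | [] => ""
       | h0 :: rest =>
         PySem.Str.strip (PySem.Str.join "\n" (PySem.List.slice lines (some (h0 + 1))
           (some (match rest with | h1 :: _ => h1 | [] => (lines.length : Int)))))) := by
  rw [show ((0 : Int)) = ((0 : Nat) : Int) from rfl, pvHeaders_eq, pvCore]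
  cases hH : pvHdrIdx lines 0 with
  | nil =>
    simp
    rfl
  | cons h0 rest =>
    simp only [List.map_cons]
    cases rest with
    | nil =>
      simp only [List.map_nil]
      have hc : ((h0 : Int) + 1) = ((h0 + 1 : Nat) : Int) := by push_cast; ring
      rw [hc, PySem.List.slice_natCast]
    | cons h1 t =>
      simp only [List.map_cons]
      have hc : ((h0 : Int) + 1) = ((h0 + 1 : Nat) : Int) := by push_cast; ring
      rw [hc, PySem.List.slice_natCast]

theorem pvAlt_empty : get_latest_changes_alt "" = "" := by decide

-- ===== VERDICT (by name: the statement is the Claim_ definition above) =====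
theorem get_latest_changes_spec : Claim_equal_get_latest_changes := by
  intro changelog _
  unfold Spec_get_latest_changes get_latest_changes get_latest_changes_alt
  by_cases hE : changelog == ""
  · rw [if_pos hE]
    have : changelog = "" := by simpa using hE
    subst this
    have := pvAlt_empty
    unfold get_latest_changes_alt at this
    exact this.symm
  · rw [if_neg hE]
    exact pvMain ((PySem.Str.split? changelog "\n").getD [])
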